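-- pv_equiv track=rewrite | github.com/zhangxc73912/od | 5_data_sort.py | get_remainder
-- ===== SOURCE A (Python) =====
-- def get_remainder(d, b, c):
-- 	# 转换16进制
-- 	d16 = hex(d)[2:]
--
-- 	# 补零
-- 	if len(d16) % 2 != 0:
-- 		d16 = '0' + d16
--
-- 	# 按照步长为2进行叠加
-- 	res = 0
-- 	for i in range(0, len(d16), 2):
-- 		res += int(d16[i:i + 2], 16)
--
-- 	remainder = res % b
-- 	if remainder < c:
-- 		return remainder
-- 	else:
-- 		return -1
-- ===== SOURCE B (Python) =====
-- def get_remainder(d, b, c):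
--     # arithmetic byte extraction instead of hex-string slicing
--     s = 0
--     while d > 0:
--         s += d & 0xFF
--         d >>= 8
--     remainder = s % b
--     return remainder if remainder < c else -1
-- ===== Notes on version B (the rewrite author's own statement) =====
-- stated objective: simpler
-- what changed: B replaces A's hex-string pipeline (hex(), padding, slicing into 2-char substrings, int(_,16) on each) with a direct arithmetic loop that extracts and sums bytes via d & 0xFF and d >>= 8.
import Mathlib
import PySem

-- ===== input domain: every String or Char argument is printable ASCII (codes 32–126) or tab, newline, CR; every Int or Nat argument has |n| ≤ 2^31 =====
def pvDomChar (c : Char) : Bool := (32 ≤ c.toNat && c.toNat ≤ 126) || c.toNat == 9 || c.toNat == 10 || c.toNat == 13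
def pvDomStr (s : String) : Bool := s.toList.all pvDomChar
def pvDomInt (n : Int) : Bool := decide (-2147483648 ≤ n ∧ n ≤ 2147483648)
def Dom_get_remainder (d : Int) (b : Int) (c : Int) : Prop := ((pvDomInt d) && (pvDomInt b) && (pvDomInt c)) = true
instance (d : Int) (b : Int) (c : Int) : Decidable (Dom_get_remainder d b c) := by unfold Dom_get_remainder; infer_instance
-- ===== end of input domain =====

-- B replaces A's hex-string build/pad/slice/parse pipeline with a plain arithmetic
-- byte-extraction loop (d & 0xFF, d >>= 8); objective: simpler, same per-byte sum.

-- ===== PORT A =====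
-- hex(n)[2:] for n ≥ 0: repeated division by 16, digits most-significant first.
def hexDigitsLE (n : Nat) : List Nat :=
  if n = 0 then [] else n % 16 :: hexDigitsLE (n / 16)
decreasing_by exact Nat.div_lt_self (by omega) (by omega)

def hexStr (n : Nat) : List Char :=
  if n = 0 then ['0'] else ((hexDigitsLE n).map Nat.digitChar).reverse

def get_remainder (d : Int) (b : Int) (c : Int) : Int :=
  let d16 := hexStr d.toNat
  let d16 := if d16.length % 2 ≠ 0 then '0' :: d16 else d16
  -- int(x, 16): PySem.Int.ofCharsBase?; never none here (every slice is a nonempty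
  -- pair of hex digits when d ≥ 0, which Pre_ guarantees), so .getD 0 is exact.
  let res := (PySem.List.pyRange 0 (d16.length : Int) 2).foldl
    (fun acc i =>
      acc + (PySem.Int.ofCharsBase? (PySem.List.slice d16 (some i) (some (i + 2))) 16).getD 0) 0
  let remainder := PySem.Int.mod res b
  if remainder < c then remainder else -1

-- ===== PORT B =====
def byteSumLoop (d : Int) (s : Int) : Int :=
  if h : 0 < d then byteSumLoop (d >>> (8 : Nat)) (s + PySem.Int.band d 255) else s
termination_by d.toNat
decreasing_by
  have h1 : d >>> (8 : Nat) = d / ((2 ^ 8 : Nat) : Int) := Int.shiftRight_eq_div_pow d 8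
  have h2 := Int.mul_ediv_add_emod d 256
  have h3 := Int.emod_nonneg d (by norm_num : (256:Int) ≠ 0)
  have h4 := Int.emod_lt_of_pos d (by norm_num : (0:Int) < 256)
  have h5 : ((2 ^ 8 : Nat) : Int) = 256 := by norm_num
  rw [h1, h5]; omega

def get_remainder_alt (d : Int) (b : Int) (c : Int) : Int :=
  let s := byteSumLoop d 0
  let remainder := PySem.Int.mod s b
  if remainder < c then remainder else -1

-- ===== PRECONDITION & SPEC =====
-- A raises ValueError on d < 0 (hex(d)[2:] keeps the 'x') and ZeroDivisionError on b = 0.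
def Pre_get_remainder (d : Int) (b : Int) (c : Int) : Prop := 0 ≤ d ∧ b ≠ 0
instance (d : Int) (b : Int) (c : Int) : Decidable (Pre_get_remainder d b c) := by
  unfold Pre_get_remainder; infer_instance

def pvWitness_get_remainder : Int × Int × Int := (51966, 7, 5)

def Spec_get_remainder (d : Int) (b : Int) (c : Int) (out : Int) : Prop := out = get_remainder_alt d b c
instance (d : Int) (b : Int) (c : Int) (out : Int) : Decidable (Spec_get_remainder d b c out) := by unfold Spec_get_remainder; infer_instance

-- ===== CLAIM (what is proved, stated in full; the proofs are below) =====
def Claim_equal_get_remainder : Prop := ∀ (d : Int) (b : Int) (c : Int), Dom_get_remainder d b c → Pre_get_remainder d b c → Spec_get_remainder d b c (get_remainder d b c)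
-- ===== LEMMAS AND PROOFS =====

-- base-256 digit sum of a natural number
def bs (n : Nat) : Nat :=
  if n = 0 then 0 else n % 256 + bs (n / 256)
decreasing_by exact Nat.div_lt_self (by omega) (by omega)

-- value of a little-endian base-16 digit list
def ofLE (L : List Nat) : Nat := L.foldr (fun d acc => d + 16 * acc) 0

-- sum of int(pair, 16) over consecutive pairs
def pairSum : List Char → Int
  | [] => 0
  | [a] => (PySem.Int.ofCharsBase? [a] 16).getD 0
  | a :: b :: r => (PySem.Int.ofCharsBase? [a, b] 16).getD 0 + pairSum r

theorem byteSumLoop_natCast (n : Nat) (s : Int) :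
    byteSumLoop (n : Int) s = s + (bs n : Int) := by
  induction n using Nat.strong_induction_on generalizing s with
  | _ n ih =>
    rw [byteSumLoop, bs]
    by_cases h : n = 0
    · subst h; norm_num
    · have hpos : (0:Int) < (n:Int) := by omega
      rw [dif_pos hpos, if_neg h]
      have hsh : ((n:Int) >>> (8:Nat)) = ((n >>> 8 : Nat) : Int) := rfl
      have hband : PySem.Int.band (n:Int) 255 = ((n &&& 255 : Nat) : Int) := by
        have := PySem.Int.band_natCast n 255
        simpa using this
      have hdiv : n >>> 8 = n / 256 := by simp [Nat.shiftRight_eq_div_pow]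
      have hmod : n &&& 255 = n % 256 := Nat.and_two_pow_sub_one_eq_mod n 8
      rw [hsh, hband, hdiv, hmod, ih (n / 256) (Nat.div_lt_self (by omega) (by omega))]
      push_cast
      ring

theorem parsePair (a b : Nat) (ha : a < 16) (hb : b < 16) :
    PySem.Int.ofCharsBase? [Nat.digitChar a, Nat.digitChar b] 16 = some ((16 * a + b : Nat) : Int) := by
  interval_cases a <;> interval_cases b <;> decide

theorem pairSum_append (T : List Char) (a b : Char) (h : T.length % 2 = 0) :
    pairSum (T ++ [a, b]) = pairSum T + (PySem.Int.ofCharsBase? [a, b] 16).getD 0 := by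
  induction T using pairSum.induct with
  | case1 => simp [pairSum]
  | case2 x => simp at h
  | case3 x y r ih =>
    simp only [List.cons_append, pairSum]
    simp only [List.length_cons] at h
    rw [ih (by omega)]
    ring

theorem bs_add_mul (a q : Nat) (ha : a < 256) : bs (a + 256 * q) = a + bs q := by
  rw [bs]
  by_cases h : a + 256 * q = 0
  · have : a = 0 ∧ q = 0 := by omega
    rw [if_pos h, this.1, this.2, bs]; simp
  · rw [if_neg h]
    have h1 : (a + 256 * q) % 256 = a := by omega
    have h2 : (a + 256 * q) / 256 = q := by omega
    rw [h1, h2]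

theorem pairSum_rev_digits (L : List Nat) (h16 : ∀ x ∈ L, x < 16) (hev : L.length % 2 = 0) :
    pairSum ((L.map Nat.digitChar).reverse) = ((bs (ofLE L) : Nat) : Int) := by
  match L, h16, hev with
  | [], _, _ => simp [pairSum, ofLE, bs]
  | [x], _, hev => simp at hev
  | l0 :: l1 :: R, h16, hev =>
    simp only [List.length_cons] at hev
    have h0 : l0 < 16 := h16 l0 (by simp)
    have h1 : l1 < 16 := h16 l1 (by simp)
    have hR : ∀ x ∈ R, x < 16 := fun x hx => h16 x (by simp [hx])
    have hrev : ((l0 :: l1 :: R).map Nat.digitChar).reverse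
        = ((R.map Nat.digitChar).reverse) ++ [Nat.digitChar l1, Nat.digitChar l0] := by
      simp
    rw [hrev, pairSum_append _ _ _ (by simp; omega), pairSum_rev_digits R hR (by omega)]
    rw [parsePair l1 l0 h1 h0]
    have hv : ofLE (l0 :: l1 :: R) = (l0 + 16 * l1) + 256 * ofLE R := by
      simp [ofLE, List.foldr]; ring
    rw [hv, bs_add_mul (l0 + 16 * l1) (ofLE R) (by omega)]
    simp only [Option.getD_some]
    push_cast
    ring

theorem slice2 (s : List Char) (t : Nat) :
    PySem.List.slice s (some (0 + 2 * (t:Int))) (some (0 + 2 * (t:Int) + 2)) = (s.drop (2*t)).take 2 := by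
  have h1 : (0 + 2*(t:Int)) = ((2*t : Nat) : Int) := by push_cast; ring
  have h2 : (0 + 2*(t:Int) + 2) = ((2*t : Nat) : Int) + ((2:Nat):Int) := by push_cast; ring
  rw [h1]
  have h3 : (↑(2*t) : Int) + 2 = ((2*t : Nat) : Int) + ((2:Nat):Int) := by push_cast; ring
  rw [h3, PySem.List.slice_natCast_add]

theorem sum_slices (k : Nat) (s : List Char) (h : s.length = 2*k) :
    ((List.range k).map (fun t => (PySem.Int.ofCharsBase? ((s.drop (2*t)).take 2) 16).getD 0)).sum
      = pairSum s := by
  induction k generalizing s with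
  | zero =>
    have : s = [] := List.eq_nil_of_length_eq_zero (by omega)
    subst this; simp [pairSum]
  | succ k ih =>
    match s, h with
    | a :: b :: t, h =>
      simp only [List.length_cons] at h
      rw [List.range_succ_eq_map]
      simp only [List.map_cons, List.map_map, List.sum_cons]
      have hdrop : ∀ t' : Nat, (((a :: b :: t).drop (2 * Nat.succ t')).take 2)
          = ((t.drop (2*t')).take 2) := by
        intro t'
        have : 2 * Nat.succ t' = (2*t') + 1 + 1 := by omega
        rw [this, List.drop_succ_cons, List.drop_succ_cons]
      have hmap : (List.range k).map (fun t' => (PySem.Int.ofCharsBase? (((a::b::t).drop (2 * Nat.succ t')).take 2) 16).getD 0)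
          = (List.range k).map (fun t' => (PySem.Int.ofCharsBase? ((t.drop (2*t')).take 2) 16).getD 0) := by
        apply List.map_congr_left; intro x _; rw [hdrop x]
      simp only [Function.comp_def]
      rw [hmap, ih t (by omega)]
      simp [pairSum]

theorem loop_eq_pairSum (s : List Char) (k : Nat) (h : s.length = 2 * k) :
    (PySem.List.pyRange 0 (s.length : Int) 2).foldl
      (fun acc i =>
        acc + (PySem.Int.ofCharsBase? (PySem.List.slice s (some i) (some (i + 2))) 16).getD 0) 0
      = pairSum s := by
  rw [PySem.List.pyRange_of_pos 0 (s.length : Int) (by norm_num : (0:Int) < 2)]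
  have hcount : (if (0:Int) < (s.length:Int) then (((s.length:Int) - 0 + 2 - 1)/2).toNat else 0) = k := by
    rw [h]; push_cast
    by_cases hk : k = 0
    · subst hk; norm_num
    · rw [if_pos (by omega)]
      omega
  rw [hcount, List.foldl_map, PySem.List.foldl_add]
  simp only [slice2]
  rw [sum_slices k s h, zero_add]

theorem hexDigitsLE_lt (n : Nat) : ∀ x ∈ hexDigitsLE n, x < 16 := by
  induction n using Nat.strong_induction_on with
  | _ n ih =>
    rw [hexDigitsLE]
    split
    · simp
    · rename_i hn
      intro x hx
      rcases List.mem_cons.mp hx with h | h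
      · subst h; exact Nat.mod_lt _ (by omega)
      · exact ih (n/16) (Nat.div_lt_self (by omega) (by omega)) x h

theorem ofLE_hexDigitsLE (n : Nat) : ofLE (hexDigitsLE n) = n := by
  induction n using Nat.strong_induction_on with
  | _ n ih =>
    rw [hexDigitsLE]
    split
    · rename_i hn; simp [ofLE, hn]
    · rename_i hn
      have : ofLE (n % 16 :: hexDigitsLE (n / 16)) = n % 16 + 16 * ofLE (hexDigitsLE (n/16)) := by
        simp [ofLE]
      rw [this, ih (n/16) (Nat.div_lt_self (by omega) (by omega))]
      omega

theorem ofLE_append_zero (L : List Nat) : ofLE (L ++ [0]) = ofLE L := by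
  simp [ofLE, List.foldr_append]

theorem loop_padded (P : List Nat) (hP : ∀ x ∈ P, x < 16) (hev : P.length % 2 = 0) :
    (PySem.List.pyRange 0 (((P.map Nat.digitChar).reverse).length : Int) 2).foldl
      (fun acc i =>
        acc + (PySem.Int.ofCharsBase? (PySem.List.slice ((P.map Nat.digitChar).reverse) (some i) (some (i + 2))) 16).getD 0) 0
      = ((bs (ofLE P) : Nat) : Int) := by
  have hlen : ((P.map Nat.digitChar).reverse).length = 2 * (P.length / 2) := by simp; omega
  rw [loop_eq_pairSum _ (P.length/2) hlen, pairSum_rev_digits P hP hev]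

theorem res_eq_bs (d : Int) (hd : 0 ≤ d) :
    (let d16 := hexStr d.toNat
     let d16 := if d16.length % 2 ≠ 0 then '0' :: d16 else d16
     (PySem.List.pyRange 0 (d16.length : Int) 2).foldl
       (fun acc i =>
         acc + (PySem.Int.ofCharsBase? (PySem.List.slice d16 (some i) (some (i + 2))) 16).getD 0) 0)
     = ((bs d.toNat : Nat) : Int) := by
  simp only
  by_cases h0 : d.toNat = 0
  · have hs : hexStr d.toNat = ['0'] := by rw [hexStr, if_pos h0]
    have hpad : (if (hexStr d.toNat).length % 2 ≠ 0 then '0' :: hexStr d.toNat else hexStr d.toNat)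
        = (([0, 0]).map Nat.digitChar).reverse := by rw [hs]; decide
    rw [hpad, loop_padded [0, 0] (by decide) (by decide)]
    rw [show ofLE [0, 0] = d.toNat by rw [h0]; decide]
  · by_cases hev : (hexDigitsLE d.toNat).length % 2 = 0
    · have hsx : hexStr d.toNat = ((hexDigitsLE d.toNat).map Nat.digitChar).reverse := by
        rw [hexStr, if_neg h0]
      have hlen : (hexStr d.toNat).length = (hexDigitsLE d.toNat).length := by rw [hsx]; simp
      have hpad : (if (hexStr d.toNat).length % 2 ≠ 0 then '0' :: hexStr d.toNat else hexStr d.toNat)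
          = ((hexDigitsLE d.toNat).map Nat.digitChar).reverse := by
        rw [if_neg (by omega)]; exact hsx
      rw [hpad, loop_padded _ (hexDigitsLE_lt d.toNat) hev, ofLE_hexDigitsLE]
    · have hsx : hexStr d.toNat = ((hexDigitsLE d.toNat).map Nat.digitChar).reverse := by
        rw [hexStr, if_neg h0]
      have hlen : (hexStr d.toNat).length = (hexDigitsLE d.toNat).length := by rw [hsx]; simp
      have hpad : (if (hexStr d.toNat).length % 2 ≠ 0 then '0' :: hexStr d.toNat else hexStr d.toNat)
          = (((hexDigitsLE d.toNat ++ [0]).map Nat.digitChar).reverse) := by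
        rw [if_pos (by omega), hsx]
        simp [List.map_append]
        rfl
      have hlt : ∀ x ∈ hexDigitsLE d.toNat ++ [0], x < 16 := by
        intro x hx
        rcases List.mem_append.mp hx with h | h
        · exact hexDigitsLE_lt d.toNat x h
        · simp at h; omega
      have hev2 : (hexDigitsLE d.toNat ++ [0]).length % 2 = 0 := by simp; omega
      rw [hpad, loop_padded _ hlt hev2, ofLE_append_zero, ofLE_hexDigitsLE]

-- ===== VERDICT (by name: the statement is the Claim_ definition above) =====
theorem get_remainder_spec : Claim_equal_get_remainder := by
  intro d b c _ hpre
  obtain ⟨hd, hb⟩ := hpre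
  unfold Spec_get_remainder get_remainder get_remainder_alt
  have h1 := res_eq_bs d hd
  have hs : byteSumLoop d 0 = ((bs d.toNat : Nat) : Int) := by
    conv_lhs => rw [← Int.toNat_of_nonneg hd]
    rw [byteSumLoop_natCast, zero_add]
  simp only at h1 ⊢
  rw [h1, hs]
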